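-- pv_equiv track=rewrite | github.com/harshalms/python | basics/arrenge_pattern.py | sortNpattern
-- ===== SOURCE A (Python) =====
-- def sortNpattern(A):
--     tempArr = []
--     for i in range(len(A)):
--         for j in range(i):
--             if A[j]>=A[i]:
--                 A[i], A[j] = A[j], A[i]
--     i, j = 0, len(A)-1
--     while i<=j:
--         if i==j:
--             tempArr.append(A[i])
--         else:
--             tempArr.append(A[i])
--             tempArr.append(A[j])
--         i+=1
--         j-=1
--     A = tempArr
--     return A
-- ===== SOURCE B (Python) =====
-- def sortNpattern(A):
--     A.sort()  # keep A's side effect: the caller's list ends up sorted ascending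
--     n = len(A)
--     h = (n + 1) // 2
--     res = [None] * n
--     res[0::2] = A[:h]
--     res[1::2] = A[h:][::-1]
--     return res
-- ===== Notes on version B (the rewrite author's own statement) =====
-- stated objective: faster
-- what changed: Replaces the hand-written quadratic swap-sort plus alternating two-pointer append loop with list.sort() and two strided slice assignments that fill the even positions with the ascending small half and the odd positions with the reversed large half.
import Mathlib
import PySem

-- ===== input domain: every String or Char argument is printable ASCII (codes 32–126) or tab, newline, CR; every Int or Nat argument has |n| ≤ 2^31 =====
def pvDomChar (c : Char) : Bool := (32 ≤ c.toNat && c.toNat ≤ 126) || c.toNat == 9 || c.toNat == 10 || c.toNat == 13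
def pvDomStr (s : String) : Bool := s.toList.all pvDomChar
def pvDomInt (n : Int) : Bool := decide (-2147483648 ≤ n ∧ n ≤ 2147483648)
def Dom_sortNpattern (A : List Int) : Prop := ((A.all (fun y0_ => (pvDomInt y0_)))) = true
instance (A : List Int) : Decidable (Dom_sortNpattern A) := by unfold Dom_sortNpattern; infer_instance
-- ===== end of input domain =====

-- B sorts with list.sort() and fills even/odd output positions by two bulk slice assignments instead
-- of A's quadratic swap-sort and alternating two-pointer loop; the equivalence proved is about the
-- RETURN value (in Python both A and B also leave the argument list sorted ascending).

-- ===== PORT A =====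
-- body of the inner loop: 'if A[j]>=A[i]: A[i], A[j] = A[j], A[i]' (both indices are always in
-- range here, so getD is exact)
def pvSwapStep (arr : List Int) (i j : Nat) : List Int :=
  if arr.getD i 0 ≤ arr.getD j 0 then (arr.set i (arr.getD j 0)).set j (arr.getD i 0) else arr

-- the two nested 'for' loops of A
def pvSortPhase (A : List Int) : List Int :=
  (List.range A.length).foldl
    (fun a i => (List.range i).foldl (fun a' j => pvSwapStep a' i j) a) A

-- the 'while i<=j' two-pointer loop appending to tempArr (= acc)
def pvWeave (arr : List Int) (i j : Int) (acc : List Int) : List Int :=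
  if _h : i ≤ j then
    if i = j then acc ++ [arr.getD i.toNat 0]
    else pvWeave arr (i + 1) (j - 1) (acc ++ [arr.getD i.toNat 0, arr.getD j.toNat 0])
  else acc
termination_by (j + 1 - i).toNat
decreasing_by omega

def sortNpattern (A : List Int) : List Int :=
  let s := pvSortPhase A
  pvWeave s 0 ((s.length : Int) - 1) []

-- ===== PORT B =====
-- res[0::2] = left and res[1::2] = right: merging the two position-classes is alternation
def pvInterleave : List Int → List Int → List Int
  | [], ys => ys
  | x :: xs, ys => x :: pvInterleave ys xs
termination_by a b => a.length + b.length

def sortNpattern_alt (A : List Int) : List Int :=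
  let s := PySem.List.sorted A (fun x => x) false
  let h := (s.length + 1) / 2
  pvInterleave (s.take h) ((s.drop h).reverse)

-- ===== PRECONDITION & SPEC =====
def Spec_sortNpattern (A : List Int) (out : List Int) : Prop := out = sortNpattern_alt A
instance (A : List Int) (out : List Int) : Decidable (Spec_sortNpattern A out) := by unfold Spec_sortNpattern; infer_instance

-- ===== CLAIM (what is proved, stated in full; the proofs are below) =====
def Claim_equal_sortNpattern : Prop := ∀ (A : List Int), Dom_sortNpattern A → Spec_sortNpattern A (sortNpattern A)

-- ===== LEMMAS AND PROOFS =====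

-- invariant of A's inner loop (a = array at inner-loop entry, i = outer index, k = inner steps done)
def pvInv (a : List Int) (i k : Nat) (arr : List Int) : Prop :=
  arr.length = a.length ∧
  (∀ j, j ≠ i → k ≤ j → arr.getD j 0 = a.getD j 0) ∧
  (arr.take k ++ [arr.getD i 0]).Perm (a.take k ++ [a.getD i 0]) ∧
  (arr.take k ++ [arr.getD i 0]).Pairwise (· ≤ ·) ∧
  (arr.getD i 0 = a.getD i 0 ∨ 0 < k ∧ arr.getD i 0 = a.getD (k - 1) 0)

lemma pvInv_zero (a : List Int) (i : Nat) : pvInv a i 0 a := by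
  refine ⟨rfl, fun _ _ _ => rfl, List.Perm.refl _, ?_, Or.inl rfl⟩
  simp

lemma pairwise_take_getD {a : List Int} {n p q : Nat}
    (hp : (a.take n).Pairwise (· ≤ ·))
    (hpq : p < q) (hq : q < n) (hlen : q < a.length) : a.getD p 0 ≤ a.getD q 0 := by
  rw [List.pairwise_iff_getElem] at hp
  have h1 : p < (a.take n).length := by simp; omega
  have h2 : q < (a.take n).length := by simp; omega
  have := hp p q h1 h2 hpq
  simpa [List.getElem_take, List.getD_eq_getElem, hlen, (by omega : p < a.length)] using this

lemma take_succ_getD {a : List Int} {k : Nat} (h : k < a.length) :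
    a.take (k + 1) = a.take k ++ [a.getD k 0] := by
  rw [List.take_add_one]
  simp [h]

lemma pvInv_step (a : List Int) (i k : Nat) (arr : List Int)
    (hi : i < a.length) (hsort : (a.take i).Pairwise (· ≤ ·))
    (hk : k < i) (h : pvInv a i k arr) : pvInv a i (k + 1) (pvSwapStep arr i k) := by
  obtain ⟨hlen, hfix, hperm, hpw, hflag⟩ := h
  have hkl : k < arr.length := by omega
  have hil : i < arr.length := by omega
  have hne : i ≠ k := by omega
  have hak : arr.getD k 0 = a.getD k 0 := hfix k (by omega) (le_refl k)
  have htk : arr.take (k+1) = arr.take k ++ [arr.getD k 0] := take_succ_getD hkl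
  have hatk : a.take (k+1) = a.take k ++ [a.getD k 0] := take_succ_getD (by omega)
  have hmem_le : ∀ x ∈ arr.take k, x ≤ arr.getD i 0 := fun x hx =>
    (List.pairwise_append.mp hpw).2.2 x hx (arr.getD i 0) (by simp)
  have hpw0 : (arr.take k).Pairwise (· ≤ ·) := (List.pairwise_append.mp hpw).1
  unfold pvSwapStep
  by_cases hc : arr.getD i 0 ≤ arr.getD k 0
  · simp only [if_pos hc]
    set arr' := (arr.set i (arr.getD k 0)).set k (arr.getD i 0) with harr'
    have hlen' : arr'.length = a.length := by simp [harr', hlen]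
    have hgi' : arr'.getD i 0 = arr.getD k 0 := by
      simp [harr', hil, hkl, hne.symm]
    have hgo' : ∀ j, j ≠ i → j ≠ k → arr'.getD j 0 = arr.getD j 0 := by
      intro j hji hjk
      by_cases hjl : j < arr.length
      · simp [harr', hjl, (Ne.symm hjk : k ≠ j), (Ne.symm hji : i ≠ j)]
      · rw [List.getD_eq_default _ _ (by simpa [harr'] using not_lt.mp hjl),
            List.getD_eq_default _ _ (not_lt.mp hjl)]
    have htk' : arr'.take (k+1) = arr.take k ++ [arr.getD i 0] := by
      rw [harr', List.take_set, List.take_set_of_le (by omega : k + 1 ≤ i), htk,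
        List.set_append_right _ _ (by simp)]
      simp [Nat.min_eq_left hkl.le]
    refine ⟨hlen', ?_, ?_, ?_, ?_⟩
    · intro j hji hkj
      exact (hgo' j hji (by omega)).trans (hfix j hji (by omega))
    · rw [htk', hgi', hak, hatk]
      refine (hperm.append_right _).trans ?_
      simp only [List.append_assoc, List.singleton_append]
      exact List.Perm.append_left _ (List.Perm.swap _ _ [])
    · rw [htk', hgi', hak]
      rw [List.pairwise_append]
      refine ⟨hpw, List.pairwise_singleton _ _, ?_⟩
      intro x hx y hy
      simp only [List.mem_singleton] at hy; subst hy
      rcases List.mem_append.mp hx with hx | hx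
      · exact le_trans (hmem_le x hx) (hak ▸ hc)
      · simp only [List.mem_singleton] at hx; subst hx; exact hak ▸ hc
    · exact Or.inr ⟨by omega, by simpa using hgi'.trans hak⟩
  · simp only [if_neg hc]
    rw [not_le] at hc
    have hv : arr.getD i 0 = a.getD i 0 := by
      rcases hflag with hv | ⟨hk0, heq⟩
      · exact hv
      · exfalso
        have h1 : a.getD (k-1) 0 ≤ a.getD k 0 :=
          pairwise_take_getD hsort (by omega) hk (by omega)
        omega
    have hpermk : (arr.take k).Perm (a.take k) :=
      (List.perm_append_right_iff _).mp (by rwa [hv] at hperm)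
    have hmem_ak : ∀ x ∈ arr.take k, x ≤ a.getD k 0 := by
      intro x hx
      obtain ⟨j, hj, hxe⟩ := List.mem_iff_getElem.mp (hpermk.subset hx)
      have hjk : j < k := by simp at hj; omega
      have hja : j < a.length := by omega
      have hxv : x = a.getD j 0 := by
        rw [← hxe]; simp [List.getElem_take, hja]
      rw [hxv]
      exact pairwise_take_getD hsort hjk hk (by omega)
    refine ⟨hlen, ?_, ?_, ?_, Or.inl hv⟩
    · intro j hji hkj
      exact hfix j hji (by omega)
    · rw [htk, hatk, hak, hv]
      exact (hpermk.append_right _).append_right _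
    · rw [htk, hak]
      rw [List.pairwise_append]
      refine ⟨?_, List.pairwise_singleton _ _, ?_⟩
      · rw [List.pairwise_append]
        refine ⟨hpw0, List.pairwise_singleton _ _, ?_⟩
        intro x hx y hy
        simp only [List.mem_singleton] at hy; subst hy
        exact hmem_ak x hx
      · intro x hx y hy
        simp only [List.mem_singleton] at hy; subst hy
        rcases List.mem_append.mp hx with hx | hx
        · exact hmem_le x hx
        · simp only [List.mem_singleton] at hx; subst hx
          rw [← hak]; exact le_of_lt hc

-- the inner fold establishes the invariant
lemma pvInner (a : List Int) (i : Nat) (hi : i < a.length)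
    (hsort : (a.take i).Pairwise (· ≤ ·)) :
    ∀ k, k ≤ i → pvInv a i k ((List.range k).foldl (fun a' j => pvSwapStep a' i j) a) := by
  intro k
  induction k with
  | zero => intro _; exact pvInv_zero a i
  | succ k ih =>
    intro hki
    rw [List.range_succ, List.foldl_append]
    exact pvInv_step a i k _ hi hsort (by omega) (ih (by omega))

-- what one full inner loop does: a permutation, sorted up to i+1
lemma pvInner_res (a : List Int) (i : Nat) (hi : i < a.length)
    (hsort : (a.take i).Pairwise (· ≤ ·)) :
    ((List.range i).foldl (fun a' j => pvSwapStep a' i j) a).Perm a ∧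
    (((List.range i).foldl (fun a' j => pvSwapStep a' i j) a).take (i+1)).Pairwise (· ≤ ·) := by
  obtain ⟨hlen, hfix, hperm, hpw, -⟩ := pvInner a i hi hsort i (le_refl i)
  set arr := (List.range i).foldl (fun a' j => pvSwapStep a' i j) a with harr
  have hil : i < arr.length := by omega
  have htk : arr.take (i+1) = arr.take i ++ [arr.getD i 0] := take_succ_getD hil
  have hatk : a.take (i+1) = a.take i ++ [a.getD i 0] := take_succ_getD hi
  have hpermt : (arr.take (i+1)).Perm (a.take (i+1)) := by rw [htk, hatk]; exact hperm
  have hdrop : arr.drop (i+1) = a.drop (i+1) := by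
    apply List.ext_getElem (by simp [hlen])
    intro j h1 h2
    have hj1 : i + 1 + j < arr.length := by simp at h1; omega
    have hj2 : i + 1 + j < a.length := by omega
    have := hfix (i+1+j) (by omega) (by omega)
    simpa [List.getElem_drop, List.getD_eq_getElem, hj1, hj2] using this
  constructor
  · have h2 : (arr.take (i+1) ++ arr.drop (i+1)).Perm a := by
      rw [hdrop]
      have h3 := hpermt.append_right (a.drop (i+1))
      rwa [List.take_append_drop] at h3
    conv_lhs => rw [← List.take_append_drop (i+1) arr]
    exact h2
  · rw [htk]; exact hpw

-- the outer loop: after i rounds the array is a permutation of A, sorted on its first i entries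
lemma pvOuter (A : List Int) :
    ∀ i, i ≤ A.length →
    (((List.range i).foldl
        (fun a i' => (List.range i').foldl (fun a' j => pvSwapStep a' i' j) a) A).Perm A ∧
     (((List.range i).foldl
        (fun a i' => (List.range i').foldl (fun a' j => pvSwapStep a' i' j) a) A).take i).Pairwise (· ≤ ·)) := by
  intro i
  induction i with
  | zero => intro _; exact ⟨List.Perm.refl _, by simp⟩
  | succ i ih =>
    intro hi
    obtain ⟨hp, hs⟩ := ih (by omega)
    rw [List.range_succ, List.foldl_append]
    set s := (List.range i).foldl
        (fun a i' => (List.range i').foldl (fun a' j => pvSwapStep a' i' j) a) A with hsdef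
    have hil : i < s.length := by rw [hp.length_eq]; omega
    obtain ⟨hp2, hs2⟩ := pvInner_res s i hil hs
    exact ⟨hp2.trans hp, hs2⟩

-- A's sorting phase computes exactly Python's sorted(A)
lemma pvSortPhase_eq (A : List Int) :
    pvSortPhase A = PySem.List.sorted A (fun x => x) false := by
  obtain ⟨hp, hs⟩ := pvOuter A A.length (le_refl _)
  have hlen : pvSortPhase A = (List.range A.length).foldl
      (fun a i' => (List.range i').foldl (fun a' j => pvSwapStep a' i' j) a) A := rfl
  rw [hlen] at *
  set s := (List.range A.length).foldl
      (fun a i' => (List.range i').foldl (fun a' j => pvSwapStep a' i' j) a) A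
  have : s.take A.length = s := by rw [← hp.length_eq]; simp
  exact (PySem.List.sorted_id_eq_of_perm_of_pairwise A s hp (this ▸ hs)).symm

-- the two-pointer loop on any segment is the interleaving of its two halves
lemma pvWeave_eq (arr : List Int) :
    ∀ m i j acc, i ≤ j → j < arr.length → m = j + 1 - i →
    pvWeave arr (i : Int) (j : Int) acc =
      acc ++ pvInterleave (((arr.drop i).take m).take ((m+1)/2))
                          ((((arr.drop i).take m).drop ((m+1)/2)).reverse) := by
  intro m
  induction m using Nat.strong_induction_on with
  | _ m ih =>
    intro i j acc hij hj hm
    have hi : i < arr.length := by omega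
    have hd : arr.drop i = arr.getD i 0 :: arr.drop (i+1) := by
      rw [List.drop_eq_getElem_cons hi]; simp [hi]
    rcases Nat.lt_or_ge m 2 with hm2 | hm2
    · -- m = 1, i = j
      have hij' : i = j := by omega
      subst hij'
      have hm1 : m = 1 := by omega
      subst hm1
      rw [pvWeave, dif_pos (le_refl _), if_pos rfl, hd]
      simp [pvInterleave]
    · -- m ≥ 2: one step, then the segment shrinks by its two ends
      have hiltj : i < j := by omega
      rw [pvWeave]
      rw [dif_pos (by exact_mod_cast Nat.le_of_lt hiltj)]
      rw [if_neg (by exact_mod_cast Nat.ne_of_lt hiltj)]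
      have hcast1 : (i : Int) + 1 = ((i+1 : Nat) : Int) := by push_cast; ring
      have hcast2 : (j : Int) - 1 = ((j-1 : Nat) : Int) := by omega
      set seg' := (arr.drop (i+1)).take (m-2) with hseg'
      have hlseg' : seg'.length = m - 2 := by simp [hseg']; omega
      have hsegd : (arr.drop i).take m = arr.getD i 0 :: (seg' ++ [arr.getD j 0]) := by
        rw [hd, hseg']
        have hm1 : m - 1 = (m - 2) + 1 := by omega
        rw [show ((arr.getD i 0 :: arr.drop (i+1)).take m) = arr.getD i 0 :: (arr.drop (i+1)).take (m-1) by
          rw [show m = (m-1)+1 by omega]; simp]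
        rw [hm1, List.take_add_one]
        have : (arr.drop (i+1))[m-2]? = some (arr.getD j 0) := by
          rw [List.getElem?_drop, List.getElem?_eq_getElem (by omega)]
          simp [hj, show i + 1 + (m - 2) = j by omega]
        rw [this]
        simp
      have hh1 : 1 ≤ (m+1)/2 := by omega
      have hh2 : (m+1)/2 - 1 ≤ m - 2 := by omega
      have htake : ((arr.drop i).take m).take ((m+1)/2) =
          arr.getD i 0 :: seg'.take ((m-1)/2) := by
        rw [hsegd, show (m+1)/2 = ((m-1)/2) + 1 by omega, List.take_succ_cons,
          List.take_append_of_le_length (by rw [hlseg']; omega : (m-1)/2 ≤ seg'.length)]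
      have hdrop : (((arr.drop i).take m).drop ((m+1)/2)).reverse =
          arr.getD j 0 :: (seg'.drop ((m-1)/2)).reverse := by
        rw [hsegd, show (m+1)/2 = ((m-1)/2) + 1 by omega, List.drop_succ_cons,
          List.drop_append_of_le_length (by rw [hlseg']; omega : (m-1)/2 ≤ seg'.length)]
        simp
      rw [htake, hdrop, pvInterleave, pvInterleave]
      rcases Nat.lt_or_ge m 3 with hm3 | hm3
      · -- m = 2 : the recursive call exits immediately
        have hm' : m = 2 := by omega
        subst hm'
        have hji : j = i + 1 := by omega
        rw [pvWeave, dif_neg (by omega)]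
        simp [hseg', show (2-1)/2 = 0 by norm_num, pvInterleave, hji]
      · -- m ≥ 3 : apply the induction hypothesis to the inner segment
        rw [hcast1, hcast2, ih (m-2) (by omega) (i+1) (j-1) _ (by omega) (by omega) (by omega)]
        simp [hseg', show (m - 2 + 1) / 2 = (m - 1) / 2 by omega]

-- ===== VERDICT (by name: the statement is the Claim_ definition above) =====
theorem sortNpattern_spec : Claim_equal_sortNpattern := by
  intro A _
  unfold Spec_sortNpattern sortNpattern sortNpattern_alt
  rw [pvSortPhase_eq]
  set s := PySem.List.sorted A (fun x => x) false with hs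
  rcases Nat.eq_zero_or_pos s.length with h0 | h1
  · rw [List.length_eq_zero_iff] at h0
    show pvWeave s 0 ((s.length : Int) - 1) [] =
      pvInterleave (s.take ((s.length + 1)/2)) ((s.drop ((s.length + 1)/2)).reverse)
    rw [h0]
    rw [pvWeave, dif_neg (by norm_num)]
    simp [pvInterleave]
  · have hcast : ((s.length : Int) - 1) = ((s.length - 1 : Nat) : Int) := by omega
    show pvWeave s 0 ((s.length : Int) - 1) [] =
      pvInterleave (s.take ((s.length + 1)/2)) ((s.drop ((s.length + 1)/2)).reverse)
    rw [hcast, show (0 : Int) = ((0 : Nat) : Int) by rfl,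
      pvWeave_eq s s.length 0 (s.length - 1) [] (by omega) (by omega) (by omega)]
    simp
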